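-- pv_equiv track=rewrite | github.com/linhdvu14/cp-sols | sols/Meta/HackerCup/2022/2022_1/B2_Watering_Well_Chapter_2.py | solve
-- ===== SOURCE A (Python) =====
-- MOD = 10**9 + 7
--
-- def solve(N, Q, trees, wells):
--     sa = sb = sab = 0
--     for a, b in trees:
--         sa = (sa + a) % MOD
--         sb = (sb + b) % MOD
--         sab = (sab + a*a + b*b) % MOD
--
--     res = 0
--     for x, y in wells:
--         res = (res + N * (x*x + y*y) + sab - 2*x*sa - 2*y*sb) % MOD
--
--     return res
-- ===== SOURCE B (Python) =====
-- MOD = 10**9 + 7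
--
-- def solve(N, Q, trees, wells):
--     total = 0
--     for x, y in wells:
--         here = N * (x * x + y * y)
--         for a, b in trees:
--             here += a * a + b * b - 2 * (x * a + y * b)
--         total = (total + here) % MOD
--     return total
-- ===== Notes on version B (the rewrite author's own statement) =====
-- stated objective: simpler
-- what changed: Drops A's precomputed modular aggregates (sa, sb, sab) and its two separate passes: B is a naive nested loop that, for each well, adds every tree's contribution directly (the well's own squared norm counted N times, as A's count parameter dictates) with one modular reduction per well.
import Mathlib
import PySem

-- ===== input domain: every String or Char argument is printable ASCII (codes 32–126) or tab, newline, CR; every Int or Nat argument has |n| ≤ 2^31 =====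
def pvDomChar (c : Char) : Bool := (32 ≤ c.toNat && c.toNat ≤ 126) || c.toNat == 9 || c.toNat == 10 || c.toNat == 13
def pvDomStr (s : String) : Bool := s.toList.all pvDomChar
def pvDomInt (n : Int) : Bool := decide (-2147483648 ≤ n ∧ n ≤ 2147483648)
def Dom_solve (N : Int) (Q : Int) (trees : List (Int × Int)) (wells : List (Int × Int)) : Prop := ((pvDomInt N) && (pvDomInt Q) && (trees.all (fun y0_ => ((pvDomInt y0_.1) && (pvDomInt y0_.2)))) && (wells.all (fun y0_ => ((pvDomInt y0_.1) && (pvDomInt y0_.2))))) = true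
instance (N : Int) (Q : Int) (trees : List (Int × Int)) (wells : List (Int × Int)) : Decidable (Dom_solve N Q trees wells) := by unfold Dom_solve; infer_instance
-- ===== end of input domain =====

-- B drops A's precomputed modular aggregates and two separate passes for a naive
-- nested per-well/per-tree loop with one modular reduction per well (simpler, not
-- faster: O(N*Q) vs O(N+Q)).

def MOD : Int := 10 ^ 9 + 7

-- ===== PORT A =====
def solve (N : Int) (Q : Int) (trees : List (Int × Int)) (wells : List (Int × Int)) : Int :=
  let s := trees.foldl
    (fun (s : Int × Int × Int) (t : Int × Int) =>
      ((s.1 + t.1) % MOD, (s.2.1 + t.2) % MOD, (s.2.2 + t.1 * t.1 + t.2 * t.2) % MOD))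
    (0, 0, 0)
  wells.foldl
    (fun res (w : Int × Int) =>
      (res + N * (w.1 * w.1 + w.2 * w.2) + s.2.2 - 2 * w.1 * s.1 - 2 * w.2 * s.2.1) % MOD)
    0

-- ===== PORT B =====
def solve_alt (N : Int) (Q : Int) (trees : List (Int × Int)) (wells : List (Int × Int)) : Int :=
  wells.foldl
    (fun total (w : Int × Int) =>
      (total +
        trees.foldl
          (fun here (t : Int × Int) =>
            here + t.1 * t.1 + t.2 * t.2 - 2 * (w.1 * t.1 + w.2 * t.2))
          (N * (w.1 * w.1 + w.2 * w.2))) % MOD)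
    0

-- ===== PRECONDITION & SPEC =====
def Spec_solve (N : Int) (Q : Int) (trees : List (Int × Int)) (wells : List (Int × Int)) (out : Int) : Prop := out = solve_alt N Q trees wells
instance (N : Int) (Q : Int) (trees : List (Int × Int)) (wells : List (Int × Int)) (out : Int) : Decidable (Spec_solve N Q trees wells out) := by unfold Spec_solve; infer_instance

-- ===== CLAIM (what is proved, stated in full; the proofs are below) =====
def Claim_equal_solve : Prop := ∀ (N : Int) (Q : Int) (trees : List (Int × Int)) (wells : List (Int × Int)), Dom_solve N Q trees wells → Spec_solve N Q trees wells (solve N Q trees wells)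

-- ===== LEMMAS AND PROOFS =====

-- exact (un-modded) sums over the tree list
def SA (trees : List (Int × Int)) : Int := (trees.map Prod.fst).sum
def SB (trees : List (Int × Int)) : Int := (trees.map Prod.snd).sum
def SAB (trees : List (Int × Int)) : Int := (trees.map (fun t => t.1 * t.1 + t.2 * t.2)).sum

-- the per-well contribution, written with the exact sums
def fW (N : Int) (trees : List (Int × Int)) (w : Int × Int) : Int :=
  N * (w.1 * w.1 + w.2 * w.2) + SAB trees - 2 * w.1 * SA trees - 2 * w.2 * SB trees

lemma tree_fold_eq (trees : List (Int × Int)) : ∀ (a b c : Int),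
    trees.foldl
      (fun (s : Int × Int × Int) (t : Int × Int) =>
        ((s.1 + t.1) % MOD, (s.2.1 + t.2) % MOD, (s.2.2 + t.1 * t.1 + t.2 * t.2) % MOD))
      (a % MOD, b % MOD, c % MOD)
    = ((a + SA trees) % MOD, (b + SB trees) % MOD, (c + SAB trees) % MOD) := by
  induction trees with
  | nil => intro a b c; simp [SA, SB, SAB]
  | cons t ts ih =>
    intro a b c
    have h3 : (c % MOD + t.1 * t.1 + t.2 * t.2) % MOD = (c + t.1 * t.1 + t.2 * t.2) % MOD := by
      rw [add_assoc, Int.emod_add_emod, ← add_assoc]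
    simp only [List.foldl_cons, Int.emod_add_emod, h3]
    rw [ih (a + t.1) (b + t.2) (c + t.1 * t.1 + t.2 * t.2)]
    simp [SA, SB, SAB]
    constructor
    · ring_nf
    constructor
    · ring_nf
    · ring_nf

lemma emod_step (r n c x d y e : Int) :
    (r % MOD + n + c % MOD - x * (d % MOD) - y * (e % MOD)) % MOD
      = (r + n + c - x * d - y * e) % MOD := by
  have h1 : r % MOD ≡ r [ZMOD MOD] := Int.emod_emod_of_dvd r dvd_rfl
  have h2 : c % MOD ≡ c [ZMOD MOD] := Int.emod_emod_of_dvd c dvd_rfl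
  have hd : d % MOD ≡ d [ZMOD MOD] := Int.emod_emod_of_dvd d dvd_rfl
  have he : e % MOD ≡ e [ZMOD MOD] := Int.emod_emod_of_dvd e dvd_rfl
  have h3 : x * (d % MOD) ≡ x * d [ZMOD MOD] := hd.mul_left x
  have h4 : y * (e % MOD) ≡ y * e [ZMOD MOD] := he.mul_left y
  exact (((h1.add_right n).add h2).sub h3).sub h4

lemma well_fold_eq (N : Int) (trees : List (Int × Int)) (wells : List (Int × Int)) :
    ∀ (r : Int),
    wells.foldl
      (fun res (w : Int × Int) =>
        (res + N * (w.1 * w.1 + w.2 * w.2) + SAB trees % MOD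
           - 2 * w.1 * (SA trees % MOD) - 2 * w.2 * (SB trees % MOD)) % MOD)
      (r % MOD)
    = (r + (wells.map (fW N trees)).sum) % MOD := by
  induction wells with
  | nil => intro r; simp
  | cons w ws ih =>
    intro r
    simp only [List.foldl_cons, emod_step]
    rw [ih (r + N * (w.1 * w.1 + w.2 * w.2) + SAB trees - 2 * w.1 * SA trees - 2 * w.2 * SB trees)]
    simp [fW]
    ring_nf

lemma inner_fold_eq (trees : List (Int × Int)) (w : Int × Int) : ∀ (h : Int),
    trees.foldl
      (fun here (t : Int × Int) =>
        here + t.1 * t.1 + t.2 * t.2 - 2 * (w.1 * t.1 + w.2 * t.2)) h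
      = h + SAB trees - 2 * w.1 * SA trees - 2 * w.2 * SB trees := by
  induction trees with
  | nil => intro h; simp [SA, SB, SAB]
  | cons t ts ih =>
    intro h
    simp only [List.foldl_cons]
    rw [ih]
    simp [SA, SB, SAB]
    ring

lemma b_fold_eq (N : Int) (trees : List (Int × Int)) (wells : List (Int × Int)) : ∀ (r : Int),
    wells.foldl
      (fun total (w : Int × Int) =>
        (total +
          trees.foldl
            (fun here (t : Int × Int) =>
              here + t.1 * t.1 + t.2 * t.2 - 2 * (w.1 * t.1 + w.2 * t.2))
            (N * (w.1 * w.1 + w.2 * w.2))) % MOD)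
      (r % MOD)
    = (r + (wells.map (fW N trees)).sum) % MOD := by
  induction wells with
  | nil => intro r; simp
  | cons w ws ih =>
    intro r
    rw [List.foldl_cons, Int.emod_add_emod,
      inner_fold_eq trees w (N * (w.1 * w.1 + w.2 * w.2))]
    rw [show r + (N * (w.1 * w.1 + w.2 * w.2) + SAB trees - 2 * w.1 * SA trees
          - 2 * w.2 * SB trees) = r + fW N trees w from rfl]
    rw [ih (r + fW N trees w), List.map_cons, List.sum_cons]
    ring_nf

-- ===== VERDICT (by name: the statement is the Claim_ definition above) =====
theorem solve_spec : Claim_equal_solve := by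
  intro N Q trees wells _
  show solve N Q trees wells = solve_alt N Q trees wells
  unfold solve solve_alt
  have ht := tree_fold_eq trees 0 0 0
  simp only [Int.zero_emod, zero_add] at ht
  simp only [ht]
  have hw := well_fold_eq N trees wells 0
  simp only [Int.zero_emod, zero_add] at hw
  simp only [hw]
  have hb := b_fold_eq N trees wells 0
  simp only [Int.zero_emod, zero_add] at hb
  simp only [hb]
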